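-- pv_equiv track=rewrite | github.com/yoyotk21/Carbon | compiler/vocab.py | same_level
-- ===== SOURCE A (Python) =====
-- operation_order = [['~'], ['@'], ['^'], ['*', '/'], ['+', '-'], ['not'], ['>', '>=', '<', '<='], ['==', '!='], ['and', 'or', 'new'], ['&']]
--
-- keyword_order = [['if', 'else', 'then'], ['for', 'while' ], ["expects", "expects_random", "satisfies"], ['fun', '=', 'struct']]
--
-- def same_level(t1, t2):
--     for li in keyword_order:
--         if t1 in li and t2 in li:
--             return True
--     for li in operation_order:
--         if t1 in li and t2 in li:
--             return True
--     return False
-- ===== SOURCE B (Python) =====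
-- operation_order = [['~'], ['@'], ['^'], ['*', '/'], ['+', '-'], ['not'], ['>', '>=', '<', '<='], ['==', '!='], ['and', 'or', 'new'], ['&']]
--
-- keyword_order = [['if', 'else', 'then'], ['for', 'while' ], ["expects", "expects_random", "satisfies"], ['fun', '=', 'struct']]
--
-- # Materialize the whole "same level" binary relation once: the set of all
-- # ordered token pairs drawn from the same sublist.  A call is then a single
-- # membership test of the pair itself -- no groups, ids or scans at call time.
-- _SAME = frozenset(
--     (a, b)
--     for li in keyword_order + operation_order
--     for a in li
--     for b in li
-- )
--
-- def same_level(t1, t2):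
--     return (t1, t2) in _SAME
-- ===== Notes on version B (the rewrite author's own statement) =====
-- stated objective: alternative
-- what changed: B precomputes the entire same-level binary relation as a frozenset of ordered token pairs (a closed lookup table of answers), so a call is one membership test of the pair (t1, t2) instead of A's per-call scan of every precedence sublist.
import Mathlib
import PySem

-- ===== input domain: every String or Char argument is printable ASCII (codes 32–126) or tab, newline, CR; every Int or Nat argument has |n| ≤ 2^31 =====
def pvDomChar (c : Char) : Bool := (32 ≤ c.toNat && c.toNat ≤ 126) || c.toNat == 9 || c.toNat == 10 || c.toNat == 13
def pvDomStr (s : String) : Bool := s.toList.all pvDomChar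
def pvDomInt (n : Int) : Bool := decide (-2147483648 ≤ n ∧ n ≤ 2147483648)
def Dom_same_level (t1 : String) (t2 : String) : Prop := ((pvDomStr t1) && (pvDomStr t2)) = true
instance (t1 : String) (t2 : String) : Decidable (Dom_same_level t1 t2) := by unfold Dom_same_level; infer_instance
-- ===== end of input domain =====

-- B materializes the same-level relation once as a set of ordered token pairs, so a call is one pair-membership test instead of A's per-call scan of every precedence sublist (same return value; tables too small for a measurable speed difference).

-- ===== PORT A =====
def operation_order : List (List String) := [["~"], ["@"], ["^"], ["*", "/"], ["+", "-"], ["not"], [">", ">=", "<", "<="], ["==", "!="], ["and", "or", "new"], ["&"]]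

def keyword_order : List (List String) := [["if", "else", "then"], ["for", "while"], ["expects", "expects_random", "satisfies"], ["fun", "=", "struct"]]

-- Python: 'for li in order: if t1 in li and t2 in li: return True'
def sl_loop (order : List (List String)) (t1 t2 : String) : Bool :=
  match order with
  | [] => false
  | li :: rest => if li.contains t1 && li.contains t2 then true else sl_loop rest t1 t2

def same_level (t1 : String) (t2 : String) : Bool :=
  if sl_loop keyword_order t1 t2 then true else sl_loop operation_order t1 t2

-- ===== PORT B =====
-- Source B: '_SAME = frozenset((a, b) for li in keyword_order + operation_order for a in li for b in li)'
def samePairs : PySem.Set (String × String) :=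
  PySem.Set.ofList
    ((keyword_order ++ operation_order).flatMap (fun li =>
      li.flatMap (fun a => li.map (fun b => (a, b)))))

-- Source B: 'return (t1, t2) in _SAME'
def same_level_alt (t1 : String) (t2 : String) : Bool :=
  PySem.Set.contains samePairs (t1, t2)

-- ===== PRECONDITION & SPEC =====
def Spec_same_level (t1 : String) (t2 : String) (out : Bool) : Prop := out = same_level_alt t1 t2
instance (t1 : String) (t2 : String) (out : Bool) : Decidable (Spec_same_level t1 t2 out) := by unfold Spec_same_level; infer_instance

-- ===== CLAIM =====
def Claim_equal_same_level : Prop := ∀ (t1 : String) (t2 : String), Dom_same_level t1 t2 → Spec_same_level t1 t2 (same_level t1 t2)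

-- ===== LEMMAS AND PROOFS =====

-- A's loop is an 'any' over the list of sublists.
theorem sl_loop_eq_any (order : List (List String)) (t1 t2 : String) :
    sl_loop order t1 t2 = order.any (fun li => li.contains t1 && li.contains t2) := by
  induction order with
  | nil => rfl
  | cons li rest ih =>
    simp only [sl_loop, List.any_cons, ih]
    cases (li.contains t1 && li.contains t2) <;> simp

theorem same_level_iff (t1 t2 : String) :
    same_level t1 t2 = true ↔
      ∃ li ∈ keyword_order ++ operation_order, t1 ∈ li ∧ t2 ∈ li := by
  unfold same_level
  rw [sl_loop_eq_any, sl_loop_eq_any]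
  have : (if keyword_order.any (fun li => li.contains t1 && li.contains t2) = true then true
          else operation_order.any (fun li => li.contains t1 && li.contains t2))
        = (keyword_order ++ operation_order).any (fun li => li.contains t1 && li.contains t2) := by
    rw [List.any_append]
    cases keyword_order.any (fun li => li.contains t1 && li.contains t2) <;> simp
  rw [this, List.any_eq_true]
  simp

theorem same_level_alt_iff (t1 t2 : String) :
    same_level_alt t1 t2 = true ↔
      ∃ li ∈ keyword_order ++ operation_order, t1 ∈ li ∧ t2 ∈ li := by
  unfold same_level_alt samePairs
  rw [PySem.Set.contains_iff, PySem.Set.mem_ofList]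
  simp only [List.mem_flatMap, List.mem_map]
  constructor
  · rintro ⟨li, hli, a, ha, b, hb, hab⟩
    cases hab
    exact ⟨li, hli, ha, hb⟩
  · rintro ⟨li, hli, h1, h2⟩
    exact ⟨li, hli, t1, h1, t2, h2, rfl⟩

-- ===== VERDICT =====
theorem same_level_spec : Claim_equal_same_level := by
  intro t1 t2 _
  unfold Spec_same_level
  rw [Bool.eq_iff_iff, same_level_iff, same_level_alt_iff]
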